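-- pv_equiv track=rewrite | github.com/huang-zirun/DearAlpha | dear_alpha/factories.py | first_order_factory
-- ===== SOURCE A (Python) =====
-- from itertools import product as iproduct
--
-- def ts_factory(op: str, field: str, windows: list[int] = None) -> list[str]:
--     """op(field, window) for each window."""
--     windows = windows or [5, 22, 66, 120, 240]
--     return [f"{op}({field}, {w})" for w in windows]
--
-- def ts_comp_factory(
--     op: str,
--     field: str,
--     factor: str,
--     paras: list,
--     windows: list[int] = None,
-- ) -> list[str]:
--     """op(field, window, factor=para) for each (window, para) combo."""
--     windows = windows or [5, 22, 66, 240]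
--     out = []
--     for w, p in iproduct(windows, paras):
--         if isinstance(p, float):
--             out.append(f"{op}({field}, {w}, {factor}={p:.1f})")
--         else:
--             out.append(f"{op}({field}, {w}, {factor}={p})")
--     return out
--
-- def vector_factory(op: str, field: str, vectors: list[str] = None) -> list[str]:
--     vectors = vectors or ["cap"]
--     return [f"{op}({field}, {v})" for v in vectors]
--
-- def twin_field_factory(
--     op: str,
--     field: str,
--     all_fields: list[str],
--     windows: list[int] = None,
-- ) -> list[str]:
--     """op(field, other_field, window) for each (other, window) combo."""
--     windows = windows or [5, 22, 66, 240]
--     others = [f for f in all_fields if f != field]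
--     return [f"{op}({field}, {other}, {w})" for w, other in iproduct(windows, others)]
--
-- _TWIN_OPS = {"ts_corr", "ts_covariance", "ts_co_kurtosis", "ts_co_skewness", "ts_theilsen"}
--
-- def first_order_factory(
--     fields: list[str],
--     ops: list[str],
--     windows: list[int] = None,
-- ) -> list[str]:
--     """
--     Expand every (field, op) pair into concrete expressions.
--     Equivalent to machine_lib.first_order_factory.
--
--     For ts_* ops: generates ts_op(field, window) for each window.
--     For twin ops:  generates op(field, other, window) for each (other, window).
--     For basic ops: generates op(field).
--     """
--     windows = windows or [5, 22, 66, 120, 240]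
--     out: list[str] = []
--
--     for field in fields:
--         out.append(field)   # raw field is itself a trivial 0-th order signal
--         for op in ops:
--             if op == "ts_percentage":
--                 out += ts_comp_factory(op, field, "percentage", [0.5], windows)
--             elif op == "ts_decay_exp_window":
--                 out += ts_comp_factory(op, field, "factor", [0.5], windows)
--             elif op == "ts_moment":
--                 out += ts_comp_factory(op, field, "k", [2, 3, 4], windows)
--             elif op == "ts_entropy":
--                 out += ts_comp_factory(op, field, "buckets", [10], windows)
--             elif op in _TWIN_OPS:
--                 out += twin_field_factory(op, field, fields, windows)
--             elif op.startswith("ts_") or op == "inst_tvr":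
--                 out += ts_factory(op, field, windows)
--             elif op.startswith("vector"):
--                 out += vector_factory(op, field)
--             elif op == "signed_power":
--                 out.append(f"{op}({field}, 2)")
--             elif op == "normalize":
--                 out.append(f"{op}({field}, useStd=false, limit=0.0)")
--             else:
--                 out.append(f"{op}({field})")
--
--     return out
-- ===== SOURCE B (Python) =====
-- # B: staged op-major construction — for each op, build the per-field expansion column
-- # first; then emit the result field-major by transposing (index i picks each column's
-- # cell), instead of A's single field-major dispatch loop of factory calls.
--
-- _COMP = {
--     "ts_percentage": ("percentage", ["0.5"]),
--     "ts_decay_exp_window": ("factor", ["0.5"]),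
--     "ts_moment": ("k", ["2", "3", "4"]),
--     "ts_entropy": ("buckets", ["10"]),
-- }
-- _TWIN = ("ts_corr", "ts_covariance", "ts_co_kurtosis", "ts_co_skewness", "ts_theilsen")
--
--
-- def _emit(op, field, fields, windows):
--     """All expressions for one (op, field) pair, args assembled with join."""
--     cfg = _COMP.get(op)
--     if cfg is not None:
--         fac, paras = cfg
--         return [op + "(" + ", ".join([field, str(w), fac + "=" + p]) + ")"
--                 for w in windows for p in paras]
--     if op in _TWIN:
--         return [op + "(" + ", ".join([field, o, str(w)]) + ")"
--                 for w in windows for o in fields if o != field]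
--     if op.startswith("ts_") or op == "inst_tvr":
--         return [op + "(" + ", ".join([field, str(w)]) + ")" for w in windows]
--     if op.startswith("vector"):
--         return [op + "(" + ", ".join([field, "cap"]) + ")"]
--     if op == "signed_power":
--         return [op + "(" + ", ".join([field, "2"]) + ")"]
--     if op == "normalize":
--         return [op + "(" + field + ", useStd=false, limit=0.0)"]
--     return [op + "(" + field + ")"]
--
--
-- def first_order_factory(fields, ops, windows=None):
--     windows = windows or [5, 22, 66, 120, 240]
--     cols = [[_emit(op, f, fields, windows) for f in fields] for op in ops]
--     out = []
--     for i, f in enumerate(fields):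
--         out.append(f)
--         for col in cols:
--             out += col[i]
--     return out
-- ===== Notes on version B (the rewrite author's own statement) =====
-- stated objective: alternative
-- what changed: B stages the work op-major: a config table plus _emit build, per op, the full column of per-field expansions first, and the output is then produced field-major by transposing (indexing each column), replacing A's single field-major if/elif loop of factory calls; argument lists are assembled with ', '.join.
import Mathlib
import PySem

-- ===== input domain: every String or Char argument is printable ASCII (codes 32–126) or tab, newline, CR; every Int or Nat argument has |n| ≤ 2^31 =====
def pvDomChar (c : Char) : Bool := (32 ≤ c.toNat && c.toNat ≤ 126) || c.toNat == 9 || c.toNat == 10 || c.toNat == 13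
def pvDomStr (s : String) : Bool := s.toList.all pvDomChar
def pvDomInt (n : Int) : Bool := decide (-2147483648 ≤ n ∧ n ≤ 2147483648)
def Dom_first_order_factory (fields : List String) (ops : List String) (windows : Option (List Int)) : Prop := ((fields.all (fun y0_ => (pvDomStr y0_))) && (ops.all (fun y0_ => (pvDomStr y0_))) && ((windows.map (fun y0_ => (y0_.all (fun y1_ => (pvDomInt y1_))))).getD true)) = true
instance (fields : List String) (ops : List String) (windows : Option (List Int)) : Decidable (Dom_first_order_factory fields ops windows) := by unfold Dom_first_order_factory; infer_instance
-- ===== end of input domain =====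

-- One honest line: B stages the work op-major — it first materialises, per op, the column of
-- per-field expansions, then emits field-major by transposing — instead of A's single
-- field-major if/elif dispatch loop of factory calls (objective: alternative).
-- NOTE on floats: ts_comp_factory's paras are only ever the literal 0.5 / 2 / 3 / 4 / 10 from
-- first_order_factory's call sites; both ports take paras as their already-formatted strings
-- ("0.5", "2", …), which is exact for these fixed literals.

-- ===== PORT A =====
def tsFactoryA (op field : String) (ws : List Int) : List String :=
  ws.map (fun w => op ++ "(" ++ field ++ ", " ++ PySem.Int.toStr w ++ ")")

def tsCompFactoryA (op field factor : String) (paras : List String) (ws : List Int) : List String :=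
  -- iproduct(windows, paras): windows outer, paras inner
  ws.flatMap (fun w => paras.map (fun p =>
    op ++ "(" ++ field ++ ", " ++ PySem.Int.toStr w ++ ", " ++ factor ++ "=" ++ p ++ ")"))

def vectorFactoryA (op field : String) : List String :=
  -- vectors defaults to ["cap"] at this call site
  ["cap"].map (fun v => op ++ "(" ++ field ++ ", " ++ v ++ ")")

def twinFieldFactoryA (op field : String) (allFields : List String) (ws : List Int) : List String :=
  let others := allFields.filter (fun f => decide (f ≠ field))
  ws.flatMap (fun w => others.map (fun other =>
    op ++ "(" ++ field ++ ", " ++ other ++ ", " ++ PySem.Int.toStr w ++ ")"))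

def twinOpsA : PySem.Set String :=
  PySem.Set.ofList ["ts_corr", "ts_covariance", "ts_co_kurtosis", "ts_co_skewness", "ts_theilsen"]

def first_order_factory (fields : List String) (ops : List String) (windows : Option (List Int)) : List String :=
  -- windows = windows or [5, 22, 66, 120, 240]  (None or [] -> default)
  let ws := match windows with
    | none => [5, 22, 66, 120, 240]
    | some l => if l.isEmpty then [5, 22, 66, 120, 240] else l
  fields.foldl (fun out field =>
    ops.foldl (fun out op =>
      if op = "ts_percentage" then out ++ tsCompFactoryA op field "percentage" ["0.5"] ws
      else if op = "ts_decay_exp_window" then out ++ tsCompFactoryA op field "factor" ["0.5"] ws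
      else if op = "ts_moment" then out ++ tsCompFactoryA op field "k" ["2", "3", "4"] ws
      else if op = "ts_entropy" then out ++ tsCompFactoryA op field "buckets" ["10"] ws
      else if PySem.Set.contains twinOpsA op then out ++ twinFieldFactoryA op field fields ws
      else if PySem.Str.startswith op "ts_" || op = "inst_tvr" then out ++ tsFactoryA op field ws
      else if PySem.Str.startswith op "vector" then out ++ vectorFactoryA op field
      else if op = "signed_power" then out ++ [op ++ "(" ++ field ++ ", 2)"]
      else if op = "normalize" then out ++ [op ++ "(" ++ field ++ ", useStd=false, limit=0.0)"]
      else out ++ [op ++ "(" ++ field ++ ")"])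
      (out ++ [field]))
    []

-- ===== PORT B =====
def compCfgB : PySem.Dict String (String × List String) :=
  PySem.Dict.ofList
    [("ts_percentage", ("percentage", ["0.5"])),
     ("ts_decay_exp_window", ("factor", ["0.5"])),
     ("ts_moment", ("k", ["2", "3", "4"])),
     ("ts_entropy", ("buckets", ["10"]))]

def twinB : List String := ["ts_corr", "ts_covariance", "ts_co_kurtosis", "ts_co_skewness", "ts_theilsen"]

-- _emit: all expressions for one (op, field) pair, args assembled with ", ".join
def emitB (op field : String) (fields : List String) (ws : List Int) : List String :=
  match PySem.Dict.get? compCfgB op with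
  | some (fac, paras) =>
      ws.flatMap (fun w => paras.map (fun p =>
        op ++ "(" ++ PySem.Str.join ", " [field, PySem.Int.toStr w, fac ++ "=" ++ p] ++ ")"))
  | none =>
      if op ∈ twinB then
        ws.flatMap (fun w => (fields.filter (fun o => decide (o ≠ field))).map (fun o =>
          op ++ "(" ++ PySem.Str.join ", " [field, o, PySem.Int.toStr w] ++ ")"))
      else if PySem.Str.startswith op "ts_" || op = "inst_tvr" then
        ws.map (fun w => op ++ "(" ++ PySem.Str.join ", " [field, PySem.Int.toStr w] ++ ")")
      else if PySem.Str.startswith op "vector" then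
        [op ++ "(" ++ PySem.Str.join ", " [field, "cap"] ++ ")"]
      else if op = "signed_power" then
        [op ++ "(" ++ PySem.Str.join ", " [field, "2"] ++ ")"]
      else if op = "normalize" then
        [op ++ "(" ++ field ++ ", useStd=false, limit=0.0)"]
      else [op ++ "(" ++ field ++ ")"]

def first_order_factory_alt (fields : List String) (ops : List String) (windows : Option (List Int)) : List String :=
  let ws := match windows with
    | none => [5, 22, 66, 120, 240]
    | some l => if l.isEmpty then [5, 22, 66, 120, 240] else l
  -- op-major columns: cols[j][i] = all expressions for (ops[j], fields[i])
  let cols := ops.map (fun op => fields.map (fun f => emitB op f fields ws))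
  (PySem.List.enumerate fields).foldl (fun out p =>
    cols.foldl (fun out col => out ++ PySem.List.pyGetD col p.1 []) (out ++ [p.2])) []

-- ===== PRECONDITION & SPEC =====
def Spec_first_order_factory (fields : List String) (ops : List String) (windows : Option (List Int)) (out : List String) : Prop := out = first_order_factory_alt fields ops windows
instance (fields : List String) (ops : List String) (windows : Option (List Int)) (out : List String) : Decidable (Spec_first_order_factory fields ops windows out) := by unfold Spec_first_order_factory; infer_instance

-- ===== CLAIM (what is proved, stated in full; the proofs are below) =====
def Claim_equal_first_order_factory : Prop := ∀ (fields : List String) (ops : List String) (windows : Option (List Int)), Dom_first_order_factory fields ops windows → Spec_first_order_factory fields ops windows (first_order_factory fields ops windows)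

-- ===== LEMMAS AND PROOFS =====

theorem join2 (a b : String) : PySem.Str.join ", " [a, b] = a ++ ", " ++ b := by
  apply String.toList_injective
  simp [PySem.Str.join, PySem.Chars.join, List.intercalate, String.toList_ofList]

theorem join3 (a b c : String) : PySem.Str.join ", " [a, b, c] = a ++ ", " ++ b ++ ", " ++ c := by
  apply String.toList_injective
  simp [PySem.Str.join, PySem.Chars.join, List.intercalate, String.toList_ofList]

-- A's per-(field, op) contribution, as a function
def gA (fields : List String) (ws : List Int) (field op : String) : List String :=
  if op = "ts_percentage" then tsCompFactoryA op field "percentage" ["0.5"] ws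
  else if op = "ts_decay_exp_window" then tsCompFactoryA op field "factor" ["0.5"] ws
  else if op = "ts_moment" then tsCompFactoryA op field "k" ["2", "3", "4"] ws
  else if op = "ts_entropy" then tsCompFactoryA op field "buckets" ["10"] ws
  else if PySem.Set.contains twinOpsA op then twinFieldFactoryA op field fields ws
  else if PySem.Str.startswith op "ts_" || op = "inst_tvr" then tsFactoryA op field ws
  else if PySem.Str.startswith op "vector" then vectorFactoryA op field
  else if op = "signed_power" then [op ++ "(" ++ field ++ ", 2)"]
  else if op = "normalize" then [op ++ "(" ++ field ++ ", useStd=false, limit=0.0)"]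
  else [op ++ "(" ++ field ++ ")"]

-- B's _emit agrees with A's dispatch, op by op
theorem emit_eq (fields : List String) (ws : List Int) (field op : String) :
    emitB op field fields ws = gA fields ws field op := by
  by_cases h1 : op = "ts_percentage"
  · subst h1
    have hg : PySem.Dict.get? compCfgB "ts_percentage" = some ("percentage", ["0.5"]) := by decide
    simp [emitB, gA, hg, tsCompFactoryA, join3, String.append_assoc]
  by_cases h2 : op = "ts_decay_exp_window"
  · subst h2
    have hg : PySem.Dict.get? compCfgB "ts_decay_exp_window" = some ("factor", ["0.5"]) := by decide
    simp [emitB, gA, hg, tsCompFactoryA, join3, String.append_assoc]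
  by_cases h3 : op = "ts_moment"
  · subst h3
    have hg : PySem.Dict.get? compCfgB "ts_moment" = some ("k", ["2", "3", "4"]) := by decide
    simp [emitB, gA, hg, tsCompFactoryA, join3, String.append_assoc]
  by_cases h4 : op = "ts_entropy"
  · subst h4
    have hg : PySem.Dict.get? compCfgB "ts_entropy" = some ("buckets", ["10"]) := by decide
    simp [emitB, gA, hg, tsCompFactoryA, join3, String.append_assoc]
  have htw : twinOpsA = twinB := by decide
  have hmk : compCfgB = PySem.Dict.mk
      [("ts_percentage", ("percentage", ["0.5"])),
       ("ts_decay_exp_window", ("factor", ["0.5"])),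
       ("ts_moment", ("k", ["2", "3", "4"])),
       ("ts_entropy", ("buckets", ["10"]))] := by decide
  have hcfg : PySem.Dict.get? compCfgB op = none := by
    rw [hmk]
    simp [beq_iff_eq, Ne.symm h1, Ne.symm h2, Ne.symm h3, Ne.symm h4, PySem.Dict.get?]
  by_cases h5 : op ∈ twinB
  · simp [emitB, gA, hcfg, h1, h2, h3, h4, h5, htw, twinFieldFactoryA, join3, String.append_assoc]
  by_cases hts : PySem.Chars.startswith op.toList ['t', 's', '_'] = true
  · simp [emitB, gA, hcfg, h1, h2, h3, h4, h5, htw, hts, tsFactoryA, join2, String.append_assoc]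
  by_cases hit : op = "inst_tvr"
  · subst hit
    simp [emitB, gA, hcfg, h5, htw, PySem.Chars.startswith, tsFactoryA, join2, String.append_assoc]
  by_cases hvec : PySem.Chars.startswith op.toList ['v', 'e', 'c', 't', 'o', 'r'] = true
  · simp [emitB, gA, hcfg, h1, h2, h3, h4, h5, htw, hts, hit, hvec, vectorFactoryA, join2, String.append_assoc]
  by_cases h8 : op = "signed_power"
  · subst h8
    simp [emitB, gA, hcfg, h5, htw, PySem.Chars.startswith, join2, String.append_assoc]
  by_cases h9 : op = "normalize"
  · subst h9
    simp [emitB, gA, hcfg, h5, htw, PySem.Chars.startswith, String.append_assoc]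
  simp [emitB, gA, hcfg, h1, h2, h3, h4, h5, htw, hts, hit, hvec, h8, h9, String.append_assoc]

-- A in flatMap form
theorem A_flatMap (fields ops : List String) (ws : List Int) :
    fields.foldl (fun out field =>
      ops.foldl (fun out op =>
        if op = "ts_percentage" then out ++ tsCompFactoryA op field "percentage" ["0.5"] ws
        else if op = "ts_decay_exp_window" then out ++ tsCompFactoryA op field "factor" ["0.5"] ws
        else if op = "ts_moment" then out ++ tsCompFactoryA op field "k" ["2", "3", "4"] ws
        else if op = "ts_entropy" then out ++ tsCompFactoryA op field "buckets" ["10"] ws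
        else if PySem.Set.contains twinOpsA op then out ++ twinFieldFactoryA op field fields ws
        else if PySem.Str.startswith op "ts_" || op = "inst_tvr" then out ++ tsFactoryA op field ws
        else if PySem.Str.startswith op "vector" then out ++ vectorFactoryA op field
        else if op = "signed_power" then out ++ [op ++ "(" ++ field ++ ", 2)"]
        else if op = "normalize" then out ++ [op ++ "(" ++ field ++ ", useStd=false, limit=0.0)"]
        else out ++ [op ++ "(" ++ field ++ ")"])
        (out ++ [field])) [] =
    fields.flatMap (fun field => field :: ops.flatMap (gA fields ws field)) := by
  have hstep : ∀ (field : String) (out : List String),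
      ops.foldl (fun out op =>
        if op = "ts_percentage" then out ++ tsCompFactoryA op field "percentage" ["0.5"] ws
        else if op = "ts_decay_exp_window" then out ++ tsCompFactoryA op field "factor" ["0.5"] ws
        else if op = "ts_moment" then out ++ tsCompFactoryA op field "k" ["2", "3", "4"] ws
        else if op = "ts_entropy" then out ++ tsCompFactoryA op field "buckets" ["10"] ws
        else if PySem.Set.contains twinOpsA op then out ++ twinFieldFactoryA op field fields ws
        else if PySem.Str.startswith op "ts_" || op = "inst_tvr" then out ++ tsFactoryA op field ws
        else if PySem.Str.startswith op "vector" then out ++ vectorFactoryA op field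
        else if op = "signed_power" then out ++ [op ++ "(" ++ field ++ ", 2)"]
        else if op = "normalize" then out ++ [op ++ "(" ++ field ++ ", useStd=false, limit=0.0)"]
        else out ++ [op ++ "(" ++ field ++ ")"])
        (out ++ [field]) = out ++ (field :: ops.flatMap (gA fields ws field)) := by
    intro field out
    have : (fun (out : List String) (op : String) =>
        if op = "ts_percentage" then out ++ tsCompFactoryA op field "percentage" ["0.5"] ws
        else if op = "ts_decay_exp_window" then out ++ tsCompFactoryA op field "factor" ["0.5"] ws
        else if op = "ts_moment" then out ++ tsCompFactoryA op field "k" ["2", "3", "4"] ws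
        else if op = "ts_entropy" then out ++ tsCompFactoryA op field "buckets" ["10"] ws
        else if PySem.Set.contains twinOpsA op then out ++ twinFieldFactoryA op field fields ws
        else if PySem.Str.startswith op "ts_" || op = "inst_tvr" then out ++ tsFactoryA op field ws
        else if PySem.Str.startswith op "vector" then out ++ vectorFactoryA op field
        else if op = "signed_power" then out ++ [op ++ "(" ++ field ++ ", 2)"]
        else if op = "normalize" then out ++ [op ++ "(" ++ field ++ ", useStd=false, limit=0.0)"]
        else out ++ [op ++ "(" ++ field ++ ")"]) =
        (fun out op => out ++ gA fields ws field op) := by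
      funext out op
      simp only [gA]
      split_ifs <;> rfl
    rw [this, PySem.List.foldl_append_eq_flatMap]
    simp
  rw [PySem.List.foldl_congr_mem _ _
        (fun out field => out ++ (field :: ops.flatMap (gA fields ws field))) _
        (fun acc x _ => hstep x acc),
      PySem.List.foldl_append_eq_flatMap]
  simp

-- B in the same flatMap form
theorem B_flatMap (fields ops : List String) (ws : List Int) :
    (PySem.List.enumerate fields).foldl (fun out p =>
      (ops.map (fun op => fields.map (fun f => emitB op f fields ws))).foldl
        (fun out col => out ++ PySem.List.pyGetD col p.1 []) (out ++ [p.2])) [] =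
    fields.flatMap (fun field => field :: ops.flatMap (fun op => emitB op field fields ws)) := by
  have hstep : ∀ (out : List String), ∀ p ∈ PySem.List.enumerate fields,
      (ops.map (fun op => fields.map (fun f => emitB op f fields ws))).foldl
        (fun out col => out ++ PySem.List.pyGetD col p.1 []) (out ++ [p.2]) =
      out ++ (p.2 :: ops.flatMap (fun op => emitB op p.2 fields ws)) := by
    intro out p hp
    rw [PySem.List.foldl_append_eq_flatMap, List.flatMap_map]
    rcases (PySem.List.mem_enumerate_iff fields 0 p).1 hp with ⟨k, hk, rfl⟩
    have hcell : ∀ op : String,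
        PySem.List.pyGetD (fields.map (fun f => emitB op f fields ws)) ((0 : Int) + ↑k) [] =
        emitB op fields[k] fields ws := by
      intro op
      rw [zero_add, PySem.List.pyGetD_natCast]
      simp [List.getD, List.getElem?_map, List.getElem?_eq_getElem hk]
    simp only [hcell]
    simp
  rw [PySem.List.foldl_congr_mem _ _
        (fun out p => out ++ (p.2 :: ops.flatMap (fun op => emitB op p.2 fields ws))) _
        hstep,
      PySem.List.foldl_append_eq_flatMap]
  conv_rhs => rw [← PySem.List.map_snd_enumerate fields 0, List.flatMap_map]
  simp

-- ===== VERDICT (by name: the statement is the Claim_ definition above) =====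
theorem first_order_factory_spec : Claim_equal_first_order_factory := by
  intro fields ops windows _
  unfold Spec_first_order_factory
  simp only [first_order_factory, first_order_factory_alt]
  rw [A_flatMap, B_flatMap]
  simp only [emit_eq]
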